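-- pv_equiv track=rewrite | github.com/hackerspace-silesia/adventofcode | 2022/2/slm.py | convert
-- ===== SOURCE A (Python) =====
-- MAPPING = {
--     'X': 'R',
--     'A': 'R',
--     'B': 'P',
--     'Y': 'P',
--     'C': 'S',
--     'Z': 'S',
--     'R': 'R',
--     'P': 'P',
--     'S': 'S',
-- }
--
-- def convert(data):
--     converted = []
--     for game in data:
--         me = ''
--         opponent, result = game
--         opponent = MAPPING[opponent]
--         if result == 'X':  # lose
--             if opponent == 'R':
--                 me = 'S'
--             elif opponent == 'P':
--                 me = 'R'
--             else:
--                 me = 'P'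
--         if result == 'Y':  # draw
--             me = opponent
--         if result == 'Z':  # win
--             if opponent == 'R':
--                 me = 'P'
--             elif opponent == 'P':
--                 me = 'S'
--             else:
--                 me = 'R'
--         converted.append([opponent, me])
--     return converted
-- ===== SOURCE B (Python) =====
-- MAPPING = {
--     'X': 'R',
--     'A': 'R',
--     'B': 'P',
--     'Y': 'P',
--     'C': 'S',
--     'Z': 'S',
--     'R': 'R',
--     'P': 'P',
--     'S': 'S',
-- }
--
-- LETTERS = ['R', 'P', 'S']
-- DELTA = {'X': -1, 'Y': 0, 'Z': 1}
--
--
-- def convert(data):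
--     out = []
--     for opponent, result in data:
--         o = MAPPING[opponent]
--         if result in DELTA:
--             me = LETTERS[(LETTERS.index(o) + DELTA[result]) % 3]
--         else:
--             me = ''
--         out.append([o, me])
--     return out
-- ===== Notes on version B (the rewrite author's own statement) =====
-- stated objective: simpler
-- what changed: Replaces the nested per-result if/elif decision trees with a single closed-form cyclic rule: index the opponent in ['R','P','S'] and shift by -1/0/+1 mod 3 for lose/draw/win.
import Mathlib
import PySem

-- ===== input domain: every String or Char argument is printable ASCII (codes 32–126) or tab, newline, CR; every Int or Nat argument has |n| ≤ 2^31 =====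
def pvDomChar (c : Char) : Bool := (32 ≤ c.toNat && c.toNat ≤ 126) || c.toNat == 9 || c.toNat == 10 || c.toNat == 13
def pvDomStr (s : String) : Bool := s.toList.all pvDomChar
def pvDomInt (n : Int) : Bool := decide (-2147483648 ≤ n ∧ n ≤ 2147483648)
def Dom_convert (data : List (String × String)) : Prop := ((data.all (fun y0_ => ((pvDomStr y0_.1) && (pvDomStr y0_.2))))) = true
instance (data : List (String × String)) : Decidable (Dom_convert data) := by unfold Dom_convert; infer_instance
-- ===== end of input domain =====

-- B replaces A's nested if/elif decision trees by one cyclic rule (opponent index ± 1 mod 3); objective: simpler.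

-- ===== PORT A =====
def pvMapping : PySem.Dict String String :=
  PySem.Dict.ofList [("X","R"),("A","R"),("B","P"),("Y","P"),("C","S"),("Z","S"),("R","R"),("P","P"),("S","S")]

-- one iteration of A's loop body (opponent lookup totalized with ""; Pre_convert excludes the KeyError inputs)
def pvRowA (game : String × String) : List String :=
  let me := ""
  let opponent := pvMapping.getD game.1 ""
  let result := game.2
  let me := if result == "X" then
      (if opponent == "R" then "S" else if opponent == "P" then "R" else "P") else me
  let me := if result == "Y" then opponent else me
  let me := if result == "Z" then
      (if opponent == "R" then "P" else if opponent == "P" then "S" else "R") else me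
  [opponent, me]

def convert (data : List (String × String)) : List (List String) :=
  data.foldl (fun converted game => converted ++ [pvRowA game]) []

-- ===== PORT B =====
def pvLetters : List String := ["R", "P", "S"]
def pvDelta : PySem.Dict String Int := PySem.Dict.ofList [("X", -1), ("Y", 0), ("Z", 1)]

-- B's loop body (index lookups totalized with defaults; never hit under Pre_convert)
def pvRowB (game : String × String) : List String :=
  let o := pvMapping.getD game.1 ""
  let me := if pvDelta.contains game.2 then
      (PySem.List.pyGet? pvLetters
        (PySem.Int.mod (((PySem.List.index? pvLetters o).getD 0 : Int) + pvDelta.getD game.2 0) 3)).getD ""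
    else ""
  [o, me]

def convert_alt (data : List (String × String)) : List (List String) :=
  (data.foldl (fun out game => out ++ [pvRowB game]) [])

-- ===== PRECONDITION & SPEC =====
-- Pre_ excludes exactly the inputs on which A raises KeyError (an opponent code outside MAPPING); B raises there too.
def Pre_convert (data : List (String × String)) : Prop :=
  ∀ g ∈ data, g.1 ∈ (["X","A","B","Y","C","Z","R","P","S"] : List String)
instance (data : List (String × String)) : Decidable (Pre_convert data) := by unfold Pre_convert; infer_instance

def pvWitness_convert : (List (String × String)) := [("A", "Y"), ("C", "X"), ("B", "Z"), ("R", "q")]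

def Spec_convert (data : List (String × String)) (out : List (List String)) : Prop := out = convert_alt data
instance (data : List (String × String)) (out : List (List String)) : Decidable (Spec_convert data out) := by unfold Spec_convert; infer_instance

-- ===== CLAIM (what is proved, stated in full; the proofs are below) =====
def Claim_equal_convert : Prop := ∀ (data : List (String × String)), Dom_convert data → Pre_convert data → Spec_convert data (convert data)

-- ===== LEMMAS AND PROOFS =====

lemma pvRow_eq (g : String × String)
    (h : g.1 ∈ (["X","A","B","Y","C","Z","R","P","S"] : List String)) :
    pvRowA g = pvRowB g := by
  obtain ⟨o, r⟩ := g
  simp only [List.mem_cons, List.not_mem_nil, or_false] at h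
  by_cases h1 : r = "X" <;> by_cases h2 : r = "Y" <;> by_cases h3 : r = "Z" <;>
    rcases h with rfl | rfl | rfl | rfl | rfl | rfl | rfl | rfl | rfl <;>
    first
      | (subst h1; decide)
      | (subst h2; decide)
      | (subst h3; decide)
      | simp [pvRowA, pvRowB, pvMapping, pvDelta, PySem.Dict.contains, PySem.Dict.ofList,
              PySem.Dict.update, PySem.Dict.insert, PySem.Dict.empty,
              h1, h2, h3, Ne.symm h1, Ne.symm h2, Ne.symm h3]

lemma pv_fold (f : (String × String) → List String) (data : List (String × String)) :
    data.foldl (fun acc g => acc ++ [f g]) [] = data.map f := by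
  simp only [PySem.List.foldl_append_singleton_eq_map, List.nil_append]

-- ===== VERDICT (by name: the statement is the Claim_ definition above) =====
theorem convert_spec : Claim_equal_convert := by
  intro data _ hpre
  unfold Spec_convert convert convert_alt
  rw [pv_fold pvRowA, pv_fold pvRowB]
  exact List.map_congr_left (fun g hg => pvRow_eq g (hpre g hg))
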